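-- pv_equiv track=rewrite | github.com/PTPhuongAnh/MyProject | ICPC0104_1.py | nho
-- ===== SOURCE A (Python) =====
-- def nho(n):
--     n=n+"abc"
--     res=""
--     nho=10000000000
--     for i in n:
--         if(i.isdigit()):
--             res+=i
--         else:
--            if(res!=""):
--             nho=min(nho,int(res))
--             res=""
--     return nho
-- ===== SOURCE B (Python) =====
-- def nho(n):
--     rest = n
--     runs = []
--     while rest:
--         if rest[0].isdigit():
--             k = 0
--             while k < len(rest) and rest[k].isdigit():
--                 k += 1
--             runs.append(rest[:k])
--             rest = rest[k:]
--         else: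
--             rest = rest[1:]
--     return min([10000000000] + [int(r) for r in runs])
-- ===== Notes on version B (the rewrite author's own statement) =====
-- stated objective: alternative
-- what changed: B materializes every maximal digit run first (span/slice loop, no accumulator state machine and no 'abc' flush sentinel) and then takes the min over the parsed runs seeded with 10000000000.
import Mathlib
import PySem

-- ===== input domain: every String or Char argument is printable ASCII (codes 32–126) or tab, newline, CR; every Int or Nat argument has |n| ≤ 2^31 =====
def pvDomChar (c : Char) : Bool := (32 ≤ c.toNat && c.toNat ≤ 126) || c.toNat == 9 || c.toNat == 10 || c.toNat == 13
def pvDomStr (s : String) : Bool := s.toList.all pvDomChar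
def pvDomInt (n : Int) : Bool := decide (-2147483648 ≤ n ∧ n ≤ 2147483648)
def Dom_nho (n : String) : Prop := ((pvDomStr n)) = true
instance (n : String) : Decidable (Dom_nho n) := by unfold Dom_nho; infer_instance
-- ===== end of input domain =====

-- B replaces A's online accumulator/flush state machine by "materialize all maximal
-- digit runs, then min over their values" — an alternative decomposition, same cost.

-- int(res) on a nonempty digit run (the only reachable case in both programs)
def nhoVal (r : List Char) : Int := (PySem.Int.ofChars? r).getD 0

-- ===== PORT A =====
-- one loop step of A: state = (res as char list, current minimum)
def nhoStep (st : List Char × Int) (c : Char) : List Char × Int :=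
  if PySem.Chars.isdigit c then (st.1 ++ [c], st.2)
  else if st.1 ≠ [] then ([], min st.2 (nhoVal st.1)) else ([], st.2)

-- iterate over the characters of n + "abc", return the accumulated minimum
def nho (n : String) : Int :=
  (List.foldl nhoStep ([], 10000000000) (n.toList ++ ['a','b','c'])).2

-- ===== PORT B =====
-- Source B's outer while loop over the remaining suffix: span off a maximal digit run
-- (the inner k-loop = takeWhile, rest[k:] = dropWhile), else drop one char
def nhoRuns : List Char → List (List Char)
  | [] => []
  | c :: cs =>
    if PySem.Chars.isdigit c then
      (c :: cs.takeWhile PySem.Chars.isdigit) :: nhoRuns (cs.dropWhile PySem.Chars.isdigit)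
    else nhoRuns cs
termination_by l => l.length
decreasing_by
  · exact Nat.lt_succ_of_le (by simpa using List.length_dropWhile_le PySem.Chars.isdigit cs)
  · simp

-- min([10000000000] + [int(r) for r in runs])
def nho_alt (n : String) : Int :=
  ((nhoRuns n.toList).map nhoVal).foldl min 10000000000

-- ===== PRECONDITION & SPEC =====
def Spec_nho (n : String) (out : Int) : Prop := out = nho_alt n
instance (n : String) (out : Int) : Decidable (Spec_nho n out) := by unfold Spec_nho; infer_instance

-- ===== CLAIM (what is proved, stated in full; the proofs are below) =====
def Claim_equal_nho : Prop := ∀ (n : String), Dom_nho n → Spec_nho n (nho n)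

-- ===== LEMMAS AND PROOFS =====

-- the runs of res ++ l where res is the currently open (unflushed) run of A
def nhoFlush : List Char → List Char → List (List Char)
  | res, [] => if res = [] then [] else [res]
  | res, c :: l =>
    if PySem.Chars.isdigit c then nhoFlush (res ++ [c]) l
    else if res = [] then nhoFlush [] l else res :: nhoFlush [] l

theorem nhoRuns_span (l : List Char) :
    (if l.takeWhile PySem.Chars.isdigit = [] then [] else [l.takeWhile PySem.Chars.isdigit])
      ++ nhoRuns (l.dropWhile PySem.Chars.isdigit) = nhoRuns l := by
  cases l with
  | nil => simp [nhoRuns]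
  | cons c cs =>
    by_cases h : PySem.Chars.isdigit c = true
    · simp [nhoRuns, List.takeWhile_cons, List.dropWhile_cons, h]
    · simp [nhoRuns, List.takeWhile_cons, List.dropWhile_cons, h]

theorem nhoFlush_eq (l : List Char) : ∀ res : List Char,
    nhoFlush res l =
      (if res ++ l.takeWhile PySem.Chars.isdigit = []
        then [] else [res ++ l.takeWhile PySem.Chars.isdigit])
      ++ nhoRuns (l.dropWhile PySem.Chars.isdigit) := by
  induction l with
  | nil => intro res; cases res <;> simp [nhoFlush, nhoRuns]
  | cons c cs ih =>
    intro res
    by_cases h : PySem.Chars.isdigit c = true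
    · simp [nhoFlush, h, List.takeWhile_cons, List.dropWhile_cons, ih]
    · have htake : List.takeWhile PySem.Chars.isdigit (c :: cs) = [] := by
        simp [List.takeWhile_cons, h]
      have hdrop : List.dropWhile PySem.Chars.isdigit (c :: cs) = c :: cs := by
        simp [List.dropWhile_cons, h]
      have hrun : nhoRuns (c :: cs) = nhoRuns cs := by simp [nhoRuns, h]
      have hnil : nhoFlush [] cs = nhoRuns cs := by
        rw [ih []]; simpa using nhoRuns_span cs
      rcases eq_or_ne res ([] : List Char) with hres | hres
      · rw [show nhoFlush res (c :: cs) = nhoFlush [] cs from by simp [nhoFlush, h, hres]]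
        rw [hnil, htake, hdrop, hrun]
        simp [hres]
      · rw [show nhoFlush res (c :: cs) = res :: nhoFlush [] cs from by simp [nhoFlush, h, hres]]
        rw [hnil, htake, hdrop, hrun]
        simp [hres]

theorem nhoFlush_nil (l : List Char) : nhoFlush [] l = nhoRuns l := by
  rw [nhoFlush_eq l []]
  simpa using nhoRuns_span l

theorem nho_fold_eq (l : List Char) : ∀ (res : List Char) (m : Int),
    (List.foldl nhoStep (res, m) (l ++ ['a','b','c'])).2
      = List.foldl (fun a r => min a (nhoVal r)) m (nhoFlush res l) := by
  induction l with
  | nil =>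
    intro res m
    rcases eq_or_ne res ([] : List Char) with hres | hres <;>
      simp [nhoStep, nhoFlush, hres, PySem.Chars.isdigit]
  | cons c cs ih =>
    intro res m
    rw [List.cons_append, List.foldl_cons]
    by_cases h : PySem.Chars.isdigit c = true
    · rw [show nhoStep (res, m) c = (res ++ [c], m) from by simp [nhoStep, h]]
      rw [ih]
      simp [nhoFlush, h]
    · rcases eq_or_ne res ([] : List Char) with hres | hres
      · rw [show nhoStep (res, m) c = ([], m) from by simp [nhoStep, h, hres]]
        rw [ih]
        simp [nhoFlush, h, hres]
      · rw [show nhoStep (res, m) c = ([], min m (nhoVal res)) from by simp [nhoStep, h, hres]]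
        rw [ih]
        simp [nhoFlush, h, hres]

-- ===== VERDICT (by name: the statement is the Claim_ definition above) =====
theorem nho_spec : Claim_equal_nho := by
  intro n _
  show nho n = nho_alt n
  unfold nho nho_alt
  rw [nho_fold_eq, nhoFlush_nil, List.foldl_map]
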